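-- pv_equiv track=rewrite | github.com/zhangkaixu/haitai | haitai/graph.py | gen_ticks
-- ===== SOURCE A (Python) =====
-- def gen_ticks(dates):
--     last_month=None
--     last_year=None
--     year_ticks=[[],[]]
--     month_ticks=[[],[]]
--     for ind,date in zip(range(0,-len(dates),-1),dates):
--         date=date.split('-')
--         month=date[0][3:]+date[1]
--         year=date[0]
--         #year+='-12' if int(date[1])>=7 else '-6'
--         if year != last_year :
--             last_year=year
--             year_ticks[0].append(ind)
--             year_ticks[1].append(year)
--
--         if month !=last_month :
--             last_month=month
--             month_ticks[0].append(ind)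
--             month_ticks[1].append(date[1])
--     return month_ticks,year_ticks
-- ===== SOURCE B (Python) =====
-- def gen_ticks(dates):
--     parts = [d.split('-') for d in dates]
--
--     def ticks(kl):
--         if not kl:
--             return [[], []]
--         marks = [(0, kl[0][1])] + [(i + 1, lab)
--                                    for i, ((prev, _), (key, lab)) in enumerate(zip(kl, kl[1:]))
--                                    if key != prev]
--         return [[-i for i, _ in marks], [lab for _, lab in marks]]
--
--     month_ticks = ticks([(p[0][3:] + p[1], p[1]) for p in parts])
--     year_ticks = ticks([(p[0], p[0]) for p in parts])
--     return month_ticks, year_ticks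
-- ===== Notes on version B (the rewrite author's own statement) =====
-- stated objective: idiomatic
-- what changed: A's single stateful pass (descending range zip, two last-value registers, in-place appends) is replaced by two independent passes that each derive tick marks from change points of consecutive key pairs (zip(kl, kl[1:])) via a shared ticks helper.
-- outside the precondition, e.g. on gen_ticks(['2020']): A raises IndexError, B raises IndexError
import Mathlib
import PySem

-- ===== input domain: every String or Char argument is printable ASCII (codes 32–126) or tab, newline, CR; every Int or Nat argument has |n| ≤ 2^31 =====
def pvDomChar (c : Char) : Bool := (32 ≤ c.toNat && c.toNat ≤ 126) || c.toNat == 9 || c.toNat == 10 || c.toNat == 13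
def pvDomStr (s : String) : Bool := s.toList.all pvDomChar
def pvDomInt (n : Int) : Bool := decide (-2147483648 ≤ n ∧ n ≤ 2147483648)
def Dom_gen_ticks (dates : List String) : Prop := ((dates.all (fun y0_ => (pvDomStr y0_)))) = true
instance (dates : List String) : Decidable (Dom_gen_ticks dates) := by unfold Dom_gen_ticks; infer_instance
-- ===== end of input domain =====

-- B replaces A's single stateful pass (descending range, two last-value registers, appends)
-- by two independent ticks-from-change-points passes built from consecutive-pair comparisons
-- (objective: idiomatic / different decomposition; same cost).

-- ===== PORT A =====
-- date.split('-'): sep is the literal nonempty "-", so split? always returns some; .getD [] is exact.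
-- date[1] raises IndexError when the string has no '-'; Pre_ excludes that, .getD "" is the total stand-in.
def gen_ticks_step
    (s : Option String × Option String × (List Int × List String) × (List Int × List String))
    (p : Int × String) :
    Option String × Option String × (List Int × List String) × (List Int × List String) :=
  let date := (PySem.Str.split? p.2 "-").getD []
  let month := PySem.Str.slice ((PySem.List.pyGet? date 0).getD "") (some 3) none
                ++ (PySem.List.pyGet? date 1).getD ""
  let year := (PySem.List.pyGet? date 0).getD ""
  let s1 := if some year ≠ s.2.1 then
              (s.1, some year, (s.2.2.1.1 ++ [p.1], s.2.2.1.2 ++ [year]), s.2.2.2)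
            else s
  if some month ≠ s1.1 then
    (some month, s1.2.1, s1.2.2.1,
      (s1.2.2.2.1 ++ [p.1], s1.2.2.2.2 ++ [(PySem.List.pyGet? date 1).getD ""]))
  else s1

def gen_ticks (dates : List String) : (List Int × List String) × (List Int × List String) :=
  let fin := ((PySem.List.pyRange 0 (-(dates.length : Int)) (-1)).zip dates).foldl
                gen_ticks_step (none, none, ([], []), ([], []))
  (fin.2.2.2, fin.2.2.1)

-- ===== PORT B =====
-- ticks(kl): the literal [(0, kl[0][1])] ++ comprehension over enumerate(zip(kl, kl[1:])).
def ticksB (kl : List (String × String)) : List Int × List String :=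
  match kl with
  | [] => ([], [])
  | x :: _ =>
    let marks : List (Int × String) :=
      ((0 : Int), x.2) ::
        (PySem.List.enumerate (kl.zip (PySem.List.slice kl (some 1) none))).filterMap
          (fun q => if q.2.2.1 ≠ q.2.1.1 then some (q.1 + 1, q.2.2.2) else none)
    (marks.map (fun m => -m.1), marks.map (fun m => m.2))

def gen_ticks_alt (dates : List String) : (List Int × List String) × (List Int × List String) :=
  let parts := dates.map (fun d => (PySem.Str.split? d "-").getD [])
  let month_ticks := ticksB (parts.map (fun p =>
      (PySem.Str.slice ((PySem.List.pyGet? p 0).getD "") (some 3) none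
         ++ (PySem.List.pyGet? p 1).getD "",
       (PySem.List.pyGet? p 1).getD "")))
  let year_ticks := ticksB (parts.map (fun p =>
      ((PySem.List.pyGet? p 0).getD "", (PySem.List.pyGet? p 0).getD "")))
  (month_ticks, year_ticks)

-- ===== PRECONDITION & SPEC =====
-- Pre_ excludes exactly the inputs on which the Python A raises IndexError:
-- a date with no '-' makes date[1] fail (B raises there too).
def Pre_gen_ticks (dates : List String) : Prop :=
  ∀ d ∈ dates, 2 ≤ ((PySem.Str.split? d "-").getD []).length
instance (dates : List String) : Decidable (Pre_gen_ticks dates) := by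
  unfold Pre_gen_ticks; infer_instance

def pvWitness_gen_ticks : List String := ["01-2020", "02-2020", "02-2021"]

def Spec_gen_ticks (dates : List String) (out : (List Int × List String) × (List Int × List String)) : Prop := out = gen_ticks_alt dates
instance (dates : List String) (out : (List Int × List String) × (List Int × List String)) : Decidable (Spec_gen_ticks dates out) := by unfold Spec_gen_ticks; infer_instance

-- ===== CLAIM (what is proved, stated in full; the proofs are below) =====
def Claim_equal_gen_ticks : Prop := ∀ (dates : List String), Dom_gen_ticks dates → Pre_gen_ticks dates → Spec_gen_ticks dates (gen_ticks dates)

-- ===== LEMMAS AND PROOFS =====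

-- the (month-key, month-label) and (year-key, year-label) pair a single date contributes
def pmPair (d : String) : String × String :=
  let date := (PySem.Str.split? d "-").getD []
  (PySem.Str.slice ((PySem.List.pyGet? date 0).getD "") (some 3) none
     ++ (PySem.List.pyGet? date 1).getD "",
   (PySem.List.pyGet? date 1).getD "")

def pyPair (d : String) : String × String :=
  let date := (PySem.Str.split? d "-").getD []
  ((PySem.List.pyGet? date 0).getD "", (PySem.List.pyGet? date 0).getD "")

-- reference recursion: tick positions/labels produced from position i on, given the last key
def refT (i : Int) (last : Option String) : List (String × String) → List Int × List String
  | [] => ([], [])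
  | (k, lab) :: rest =>
    let r := refT (i - 1) (some k) rest
    if some k ≠ last then (i :: r.1, lab :: r.2) else r

theorem ticksB_aux (rest : List (String × String)) :
    ∀ (x : String × String) (s : Int),
    (let M := (PySem.List.enumerate ((x :: rest).zip rest) s).filterMap
        (fun q => if q.2.2.1 ≠ q.2.1.1 then some (q.1 + 1, q.2.2.2) else none)
     (M.map (fun m => -m.1), M.map (fun m => m.2)) = refT (-(s + 1)) (some x.1) rest) := by
  induction rest with
  | nil => intro x s; simp [refT]
  | cons y rest ih =>
      intro x s
      simp only [List.zip_cons_cons, PySem.List.enumerate_cons, List.filterMap_cons]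
      have this := ih y (s + 1)
      simp only at this
      have h3 : (-(s + 1) - 1 : Int) = -((s + 1) + 1) := by ring
      by_cases h : y.1 = x.1
      · simp only [h, ne_eq, not_true_eq_false, if_false]
        rw [refT, if_neg (by simp [h]), h3]
        exact this
      · simp only [ne_eq, h, not_false_eq_true, if_true]
        rw [refT, if_pos (by simpa using h), h3, ← this]
        rfl

theorem ticksB_eq_refT (kl : List (String × String)) : ticksB kl = refT 0 none kl := by
  cases kl with
  | nil => rfl
  | cons x rest =>
      rw [ticksB]
      simp only [PySem.List.slice_from_one, List.tail_cons]
      have := ticksB_aux rest x 0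
      simp only at this
      rw [refT, if_pos (by simp)]
      have h0 : -(0 + 1 : Int) = (0 : Int) - 1 := by ring
      rw [h0] at this
      simp only [List.map_cons, neg_zero, ← this]

theorem pyPair_snd (d : String) : (pyPair d).2 = (pyPair d).1 := rfl

theorem refT_cons (i : Int) (last : Option String) (p : String × String)
    (rest : List (String × String)) :
    refT i last (p :: rest) =
      if some p.1 ≠ last then
        (i :: (refT (i - 1) (some p.1) rest).1, p.2 :: (refT (i - 1) (some p.1) rest).2)
      else refT (i - 1) (some p.1) rest := by
  cases p; rfl

theorem step_eq
    (s : Option String × Option String × (List Int × List String) × (List Int × List String))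
    (i : Int) (d : String) :
    gen_ticks_step s (i, d) =
      (let mo := (pmPair d).1
       let yr := (pyPair d).1
       let s1 := if some yr ≠ s.2.1 then
                   (s.1, some yr, (s.2.2.1.1 ++ [i], s.2.2.1.2 ++ [yr]), s.2.2.2)
                 else s
       if some mo ≠ s1.1 then
         (some mo, s1.2.1, s1.2.2.1, (s1.2.2.2.1 ++ [i], s1.2.2.2.2 ++ [(pmPair d).2]))
       else s1) := rfl

theorem foldA (dates : List String) :
    ∀ (i : Int) (lm ly : Option String)
      (yt mt : List Int × List String),
    (((PySem.List.pyRange i (i - dates.length) (-1)).zip dates).foldl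
        gen_ticks_step (lm, ly, yt, mt)).2.2
    = ((yt.1 ++ (refT i ly (dates.map pyPair)).1, yt.2 ++ (refT i ly (dates.map pyPair)).2),
       (mt.1 ++ (refT i lm (dates.map pmPair)).1, mt.2 ++ (refT i lm (dates.map pmPair)).2)) := by
  induction dates with
  | nil =>
      intro i lm ly yt mt
      rw [PySem.List.pyRange_neg_one_eq_nil (by simp)]
      simp [refT]
  | cons d ds ih =>
      intro i lm ly yt mt
      have hlt : i - ((d :: ds).length : Int) < i := by
        simp only [List.length_cons]; push_cast; omega
      have harg : i - ((d :: ds).length : Int) = (i - 1) - (ds.length : Int) := by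
        simp only [List.length_cons]; push_cast; ring
      rw [PySem.List.pyRange_neg_one_cons hlt, List.zip_cons_cons, List.foldl_cons, harg,
          List.map_cons, List.map_cons, refT_cons, refT_cons, step_eq]
      simp only [pyPair_snd]
      by_cases hy : some (pyPair d).1 ≠ ly <;> by_cases hm : some (pmPair d).1 ≠ lm
      · rw [if_pos hy, if_pos hy]
        simp only []
        rw [if_pos hm, if_pos hm, ih (i - 1) (some (pmPair d).1) (some (pyPair d).1) _ _]
        simp
      · rw [if_pos hy, if_pos hy]
        simp only []
        rw [if_neg hm, if_neg hm]
        rw [not_ne_iff] at hm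
        rw [← hm, ih (i - 1) (some (pmPair d).1) (some (pyPair d).1) _ _]
        simp
      · rw [if_neg hy, if_neg hy]
        rw [not_ne_iff] at hy
        simp only []
        rw [if_pos hm, if_pos hm, ← hy,
            ih (i - 1) (some (pmPair d).1) (some (pyPair d).1) _ _]
        simp
      · rw [if_neg hy, if_neg hy]
        rw [not_ne_iff] at hy hm
        simp only []
        rw [← hy,
            if_neg (not_ne_iff.mpr hm), if_neg (not_ne_iff.mpr hm), ← hm,
            ih (i - 1) (some (pmPair d).1) (some (pyPair d).1) _ _]

-- ===== VERDICT (by name: the statement is the Claim_ definition above) =====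
theorem gen_ticks_spec : Claim_equal_gen_ticks := by
  intro dates _ _
  unfold Spec_gen_ticks gen_ticks gen_ticks_alt
  have h0 : (-(dates.length : Int)) = (0 : Int) - (dates.length : Int) := by ring
  simp only [h0, foldA dates 0 none none ([], []) ([], []), ticksB_eq_refT,
    List.map_map, List.nil_append]
  rfl
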